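-- pv_equiv track=rewrite | github.com/hyung000620/ESTSOFT | CODING_TEST/20230630.py | find_minimum_video_size
-- ===== SOURCE A (Python) =====
-- def find_minimum_video_size(N, M, lecture_lengths):
--     # 가능한 영상 크기의 최소값과 최대값 초기화
--     start = max(lecture_lengths)
--     end = sum(lecture_lengths)
--
--     result = 0
--
--     # 이분 탐색을 통해 가능한 영상 크기의 최소값을 구함
--     while start <= end:
--         mid = (start + end) // 2  # 가능한 영상 크기의 중간값
--
--         count = 1
--         total_length = 0  # 현재 영상 파일의 길이 초기화
--
--         for length in lecture_lengths:
--             if total_length + length > mid: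
--                 count += 1
--                 total_length = 0
--
--             total_length += length
--
--         if count <= M:
--             result = mid
--             end = mid - 1
--         else:
--             start = mid + 1
--
--     return result
-- ===== SOURCE B (Python) =====
-- def _segments(lecture_lengths, limit):
--     """Number of greedy segments: each segment is seeded by one lecture and
--     then extended with a second pointer while the running sum stays <= limit."""
--     n = len(lecture_lengths)
--     segs = 0
--     i = 0
--     while i < n:
--         acc = lecture_lengths[i]
--         i += 1
--         while i < n and acc + lecture_lengths[i] <= limit:
--             acc += lecture_lengths[i]
--             i += 1
--         segs += 1
--     return segs
--
--
-- def _search(M, lecture_lengths, lo, hi):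
--     """Recursive binary search: smallest accepted probe in [lo, hi], None if no
--     probe is accepted."""
--     if lo > hi:
--         return None
--     mid = (lo + hi) // 2
--     if _segments(lecture_lengths, mid) <= M:
--         better = _search(M, lecture_lengths, lo, mid - 1)
--         return mid if better is None else better
--     return _search(M, lecture_lengths, mid + 1, hi)
--
--
-- def find_minimum_video_size(N, M, lecture_lengths):
--     found = _search(M, lecture_lengths, max(lecture_lengths), sum(lecture_lengths))
--     return 0 if found is None else found
-- ===== Notes on version B (the rewrite author's own statement) =====
-- stated objective: alternative
-- what changed: Binary-search-on-the-answer is kept (its exact probe sequence is observable because mixed-sign lengths make greedy feasibility non-monotone), but it is restructured as an Option-returning recursive search with no result accumulator, and the greedy segment count is computed by a two-pointer nested walk (segs from 0, each segment seeded by one element) instead of A's single fold over (count, total) with a reset sentinel and count starting at 1.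
import Mathlib
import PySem

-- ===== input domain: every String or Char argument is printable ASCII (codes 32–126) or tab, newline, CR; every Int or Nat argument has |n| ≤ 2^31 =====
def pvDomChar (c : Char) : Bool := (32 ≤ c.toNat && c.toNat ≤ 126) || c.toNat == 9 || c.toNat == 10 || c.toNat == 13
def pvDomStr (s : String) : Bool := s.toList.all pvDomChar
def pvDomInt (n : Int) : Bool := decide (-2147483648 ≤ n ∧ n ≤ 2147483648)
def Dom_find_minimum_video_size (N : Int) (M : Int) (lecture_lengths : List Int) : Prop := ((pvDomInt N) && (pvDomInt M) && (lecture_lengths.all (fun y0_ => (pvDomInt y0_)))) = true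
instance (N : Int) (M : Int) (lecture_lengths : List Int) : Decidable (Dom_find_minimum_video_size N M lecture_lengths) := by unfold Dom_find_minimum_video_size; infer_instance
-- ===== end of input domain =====

-- B restructures A's answer search (binary search kept: its exact probe sequence is observable
-- on mixed-sign inputs) as an Option-returning recursion without the result accumulator, and
-- counts segments with a two-pointer walk instead of A's single fold with a reset sentinel;
-- objective: alternative (same cost).

-- midpoint (lo + hi) // 2, as both Pythons compute it
def pvMid (lo hi : Int) : Int := PySem.Int.floordiv (lo + hi) 2

-- cited by the termination proofs of pvBisect and pvSearch
theorem pvMid_bounds {lo hi : Int} (h : lo ≤ hi) : lo ≤ pvMid lo hi ∧ pvMid lo hi ≤ hi :=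
  PySem.Int.floordiv_two_mid_bounds h

-- ===== PORT A =====
-- inner `for length in lecture_lengths` loop of A: state (count, total), count starts at 1
def pvCountA (mid : Int) (ls : List Int) : Int :=
  (ls.foldl (fun (st : Int × Int) length =>
    if st.2 + length > mid then (st.1 + 1, length) else (st.1, st.2 + length)) (1, 0)).1

-- A's `while start <= end` binary-search loop, state (start, end, result)
def pvBisect (M : Int) (ls : List Int) (start stop result : Int) : Int :=
  if h : start ≤ stop then
    if pvCountA (pvMid start stop) ls ≤ M then pvBisect M ls start (pvMid start stop - 1) (pvMid start stop)
    else pvBisect M ls (pvMid start stop + 1) stop result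
  else result
termination_by (stop + 1 - start).toNat
decreasing_by
  · have hb := pvMid_bounds h; omega
  · have hb := pvMid_bounds h; omega

def find_minimum_video_size (N : Int) (M : Int) (lecture_lengths : List Int) : Int :=
  match PySem.List.max? lecture_lengths (fun x => x) with
  | none => 0  -- Python's max([]) raises ValueError here; excluded by Pre_
  | some mx => pvBisect M lecture_lengths mx lecture_lengths.sum 0

-- ===== PORT B =====
-- B's inner two-pointer `while` advancing i: rendered as the not-yet-walked suffix of the list
def pvInner (limit acc : Int) (rest : List Int) : List Int :=
  match rest with
  | [] => []
  | x :: rs => if acc + x ≤ limit then pvInner limit (acc + x) rs else x :: rs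

-- the inner pointer never moves backwards (cited by pvOuter's termination proof)
theorem pvInner_length_le (limit : Int) : ∀ (rest : List Int) (acc : Int),
    (pvInner limit acc rest).length ≤ rest.length := by
  intro rest
  induction rest with
  | nil => intro acc; simp [pvInner]
  | cons x rs ih =>
    intro acc
    simp only [pvInner]
    split
    · exact le_trans (ih _) (by simp)
    · simp

-- B's outer `while i < n` loop of _segments: segs starts at 0, each segment seeded by one element
def pvOuter (limit : Int) (rest : List Int) (segs : Int) : Int :=
  match rest with
  | [] => segs
  | x :: rs => pvOuter limit (pvInner limit x rs) (segs + 1)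
termination_by rest.length
decreasing_by
  have := pvInner_length_le limit rs x; simp only [List.length_cons]; omega

-- B's _search: recursive binary search returning the smallest accepted probe as an Option
def pvSearch (M : Int) (ls : List Int) (lo hi : Int) : Option Int :=
  if h : lo > hi then none
  else
    if pvOuter (pvMid lo hi) ls 0 ≤ M then
      match pvSearch M ls lo (pvMid lo hi - 1) with
      | none => some (pvMid lo hi)
      | some b => some b
    else pvSearch M ls (pvMid lo hi + 1) hi
termination_by (hi + 1 - lo).toNat
decreasing_by
  · have hb := pvMid_bounds (by omega : lo ≤ hi); omega
  · have hb := pvMid_bounds (by omega : lo ≤ hi); omega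

def find_minimum_video_size_alt (N : Int) (M : Int) (lecture_lengths : List Int) : Int :=
  match PySem.List.max? lecture_lengths (fun x => x) with
  | none => 0  -- Python's max([]) raises ValueError here too
  | some mx =>
    match pvSearch M lecture_lengths mx lecture_lengths.sum with
    | none => 0
    | some v => v

-- ===== PRECONDITION & SPEC =====
-- Pre_ excludes only the empty list, on which A raises ValueError (max() of an empty sequence).
def Pre_find_minimum_video_size (N : Int) (M : Int) (lecture_lengths : List Int) : Prop :=
  lecture_lengths ≠ []
instance (N : Int) (M : Int) (lecture_lengths : List Int) : Decidable (Pre_find_minimum_video_size N M lecture_lengths) := by unfold Pre_find_minimum_video_size; infer_instance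

def pvWitness_find_minimum_video_size : Int × Int × List Int := (0, 2, [1, 2, 3])

def Spec_find_minimum_video_size (N : Int) (M : Int) (lecture_lengths : List Int) (out : Int) : Prop := out = find_minimum_video_size_alt N M lecture_lengths
instance (N : Int) (M : Int) (lecture_lengths : List Int) (out : Int) : Decidable (Spec_find_minimum_video_size N M lecture_lengths out) := by unfold Spec_find_minimum_video_size; infer_instance

-- ===== CLAIM (what is proved, stated in full; the proofs are below) =====
def Claim_equal_find_minimum_video_size : Prop := ∀ (N : Int) (M : Int) (lecture_lengths : List Int), Dom_find_minimum_video_size N M lecture_lengths → Pre_find_minimum_video_size N M lecture_lengths → Spec_find_minimum_video_size N M lecture_lengths (find_minimum_video_size N M lecture_lengths)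

-- ===== LEMMAS AND PROOFS =====

-- A's fold state (c, acc) mid-segment agrees with B's outer walk resumed past the current segment
theorem count_align (m : Int) : ∀ (rest : List Int) (c acc : Int),
    (rest.foldl (fun (st : Int × Int) length =>
      if st.2 + length > m then (st.1 + 1, length) else (st.1, st.2 + length)) (c, acc)).1
    = pvOuter m (pvInner m acc rest) c := by
  intro rest
  induction rest with
  | nil => intro c acc; simp [pvInner, pvOuter]
  | cons x rs ih =>
    intro c acc
    by_cases hx : acc + x > m
    · simp only [List.foldl_cons, pvInner, if_neg (by omega : ¬ acc + x ≤ m), if_pos hx]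
      rw [ih (c + 1) x, pvOuter]
    · simp only [List.foldl_cons, pvInner, if_pos (by omega : acc + x ≤ m),
        if_neg (by omega : ¬ acc + x > m)]
      exact ih c (acc + x)

-- for a probe at least as large as the head element the two counters agree
theorem count_eq_outer (m x : Int) (rs : List Int) (hx : x ≤ m) :
    pvCountA m (x :: rs) = pvOuter m (x :: rs) 0 := by
  unfold pvCountA
  simp only [List.foldl_cons, if_neg (by omega : ¬ (0 : Int) + x > m)]
  rw [zero_add]
  rw [count_align m rs 1 x]
  conv_rhs => rw [pvOuter]
  norm_num

-- the two searches coincide whenever every probe dominates the head element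
theorem bisect_eq_search (M x : Int) (rs : List Int) :
    ∀ (n : Nat) (lo hi r : Int), (hi + 1 - lo).toNat ≤ n → x ≤ lo →
      pvBisect M (x :: rs) lo hi r = (pvSearch M (x :: rs) lo hi).getD r := by
  intro n
  induction n with
  | zero =>
    intro lo hi r hn hx
    rw [pvBisect, pvSearch]
    have hgt : lo > hi := by omega
    simp [hgt, Option.getD]
  | succ k ih =>
    intro lo hi r hn hx
    rw [pvBisect, pvSearch]
    by_cases hle : lo ≤ hi
    · have hb := pvMid_bounds hle
      rw [dif_pos hle, dif_neg (by omega : ¬ lo > hi),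
        count_eq_outer (pvMid lo hi) x rs (by omega)]
      by_cases hfeas : pvOuter (pvMid lo hi) (x :: rs) 0 ≤ M
      · rw [if_pos hfeas, if_pos hfeas,
          ih lo (pvMid lo hi - 1) (pvMid lo hi) (by omega) hx]
        cases pvSearch M (x :: rs) lo (pvMid lo hi - 1) with
        | none => simp [Option.getD]
        | some b => simp [Option.getD]
      · rw [if_neg hfeas, if_neg hfeas,
          ih (pvMid lo hi + 1) hi r (by omega) (by omega)]
    · rw [dif_neg hle, dif_pos (by omega : lo > hi)]
      simp [Option.getD]

-- ===== VERDICT (by name: the statement is the Claim_ definition above) =====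
theorem find_minimum_video_size_spec : Claim_equal_find_minimum_video_size := by
  intro N M ls _hdom hpre
  unfold Spec_find_minimum_video_size find_minimum_video_size find_minimum_video_size_alt
  cases hmax : PySem.List.max? ls (fun x => x) with
  | none => rfl
  | some mx =>
    cases ls with
    | nil => exact absurd rfl hpre
    | cons x rs =>
      have hx : x ≤ mx := PySem.List.max?_isMax hmax x (by simp)
      dsimp only
      rw [bisect_eq_search M x rs ((x :: rs).sum + 1 - mx).toNat mx (x :: rs).sum 0
        le_rfl hx]
      cases pvSearch M (x :: rs) mx (x :: rs).sum with
      | none => simp [Option.getD]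
      | some v => simp [Option.getD]
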